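-- pv_equiv track=rewrite | github.com/weijiawang2003/CS337Proj2Part2 | recipe_api.py | _methods_for_json
-- ===== SOURCE A (Python) =====
-- from typing import List, Dict, Optional, Tuple
--
-- PRIMARY_METHODS = [
--     "bake",
--     "boil",
--     "broil",
--     "fry",
--     "deep-fry",
--     "pan-fry",
--     "stir-fry",
--     "braise",
--     "roast",
--     "grill",
--     "steam",
--     "stew",
--     "simmer",
--     "saute",
--     "searing",
--     "pressure cook",
--     "blend",
--     "mix",
--     "poach",
-- ]
--
-- def _methods_for_json(methods: List[str]) -> Dict[str, List[str]]:
--     primary: List[str] = []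
--     other: List[str] = []
--
--     for m in methods:
--         if m in PRIMARY_METHODS:
--             if m not in primary:
--                 primary.append(m)
--         else:
--             if m not in other:
--                 other.append(m)
--
--     return {
--         "primary": primary,
--         "other": other,
--     }
-- ===== SOURCE B (Python) =====
-- from typing import List, Dict
--
-- PRIMARY_METHODS = [
--     "bake",
--     "boil",
--     "broil",
--     "fry",
--     "deep-fry",
--     "pan-fry",
--     "stir-fry",
--     "braise",
--     "roast",
--     "grill",
--     "steam",
--     "stew",
--     "simmer",
--     "saute",
--     "searing",
--     "pressure cook",
--     "blend",
--     "mix",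
--     "poach",
-- ]
--
-- def _methods_for_json(methods: List[str]) -> Dict[str, List[str]]:
--     unique = list(dict.fromkeys(methods))
--     return {
--         "primary": [m for m in unique if m in PRIMARY_METHODS],
--         "other": [m for m in unique if m not in PRIMARY_METHODS],
--     }
-- ===== Notes on version B (the rewrite author's own statement) =====
-- stated objective: simpler
-- what changed: Replaces the interleaved dedup+partition loop (which dedups by scanning the growing output lists) with a hash-based order-preserving dedup (dict.fromkeys) followed by two separate classification passes over the unique list.
import Mathlib
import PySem

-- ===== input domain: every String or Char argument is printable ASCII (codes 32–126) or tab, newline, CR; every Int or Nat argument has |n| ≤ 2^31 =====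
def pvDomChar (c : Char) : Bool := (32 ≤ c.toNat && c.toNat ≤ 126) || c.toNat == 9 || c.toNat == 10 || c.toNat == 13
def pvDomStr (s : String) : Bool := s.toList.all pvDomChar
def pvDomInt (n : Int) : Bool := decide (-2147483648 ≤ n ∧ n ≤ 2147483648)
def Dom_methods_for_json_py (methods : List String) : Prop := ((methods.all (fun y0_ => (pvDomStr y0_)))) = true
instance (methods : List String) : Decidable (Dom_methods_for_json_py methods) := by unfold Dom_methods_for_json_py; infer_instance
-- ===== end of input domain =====

-- B replaces A's single interleaved dedup+partition loop by an order-preserving dedup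
-- (dict.fromkeys) followed by two separate classification passes; objective: simpler.

-- ===== PORT A =====
def pvPrimaryMethods : List String :=
  ["bake", "boil", "broil", "fry", "deep-fry", "pan-fry", "stir-fry", "braise",
   "roast", "grill", "steam", "stew", "simmer", "saute", "searing",
   "pressure cook", "blend", "mix", "poach"]

-- the 'for m in methods' loop of A, carrying the primary/other accumulators
def pvLoopA : List String → List String → List String → List String × List String
  | [], primary, other => (primary, other)
  | m :: rest, primary, other =>
    if m ∈ pvPrimaryMethods then
      if m ∈ primary then pvLoopA rest primary other
      else pvLoopA rest (primary ++ [m]) other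
    else
      if m ∈ other then pvLoopA rest primary other
      else pvLoopA rest primary (other ++ [m])

def methods_for_json_py (methods : List String) : List (String × List String) :=
  let r := pvLoopA methods [] []
  [("primary", r.1), ("other", r.2)]

-- ===== PORT B =====
def methods_for_json_py_alt (methods : List String) : List (String × List String) :=
  let unique := PySem.List.dedup methods   -- list(dict.fromkeys(methods))
  [("primary", unique.filter (fun m => decide (m ∈ pvPrimaryMethods))),
   ("other", unique.filter (fun m => !decide (m ∈ pvPrimaryMethods)))]

-- ===== PRECONDITION & SPEC =====
def Spec_methods_for_json_py (methods : List String) (out : List (String × List String)) : Prop := out = methods_for_json_py_alt methods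
instance (methods : List String) (out : List (String × List String)) : Decidable (Spec_methods_for_json_py methods out) := by unfold Spec_methods_for_json_py; infer_instance

-- ===== CLAIM (what is proved, stated in full; the proofs are below) =====
def Claim_equal_methods_for_json_py : Prop := ∀ (methods : List String), Dom_methods_for_json_py methods → Spec_methods_for_json_py methods (methods_for_json_py methods)

-- ===== LEMMAS AND PROOFS =====

-- A's loop over `ms`, started from accumulators that are the primary/other filtrations of
-- a seen-list `s`, computes the filtrations of the Set-fold (= ordered dedup) of `ms` over `s`.
theorem pvLoopA_eq_filter_fold (ms : List String) : ∀ (s : List String),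
    pvLoopA ms (s.filter (fun m => decide (m ∈ pvPrimaryMethods)))
              (s.filter (fun m => !decide (m ∈ pvPrimaryMethods)))
      = ((ms.foldl PySem.Set.add s).filter (fun m => decide (m ∈ pvPrimaryMethods)),
         (ms.foldl PySem.Set.add s).filter (fun m => !decide (m ∈ pvPrimaryMethods))) := by
  induction ms with
  | nil => intro s; simp [pvLoopA]
  | cons m rest ih =>
    intro s
    by_cases hp : m ∈ pvPrimaryMethods
    · by_cases hs : m ∈ s
      · have h1 : m ∈ s.filter (fun m => decide (m ∈ pvPrimaryMethods)) := by
          simp [List.mem_filter, hs, hp]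
        have hadd : PySem.Set.add s m = s := by
          simp [PySem.Set.add, hs]
        simp [pvLoopA, hp, h1, List.foldl_cons, hadd, ih s]
      · have h1 : m ∉ s.filter (fun m => decide (m ∈ pvPrimaryMethods)) := by
          simp [List.mem_filter, hs]
        have hadd : PySem.Set.add s m = s ++ [m] := by
          simp [PySem.Set.add, hs]
        have e1 : s.filter (fun m => decide (m ∈ pvPrimaryMethods)) ++ [m]
            = (s ++ [m]).filter (fun m => decide (m ∈ pvPrimaryMethods)) := by
          simp [List.filter_append, hp]
        have e2 : s.filter (fun m => !decide (m ∈ pvPrimaryMethods))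
            = (s ++ [m]).filter (fun m => !decide (m ∈ pvPrimaryMethods)) := by
          simp [List.filter_append, hp]
        simp only [pvLoopA, if_pos hp, if_neg h1, e1, e2, List.foldl_cons, hadd, ih (s ++ [m])]
    · by_cases hs : m ∈ s
      · have h1 : m ∈ s.filter (fun m => !decide (m ∈ pvPrimaryMethods)) := by
          simp [List.mem_filter, hs, hp]
        have hadd : PySem.Set.add s m = s := by
          simp [PySem.Set.add, hs]
        simp [pvLoopA, hp, h1, List.foldl_cons, hadd, ih s]
      · have h1 : m ∉ s.filter (fun m => !decide (m ∈ pvPrimaryMethods)) := by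
          simp [List.mem_filter, hs]
        have hadd : PySem.Set.add s m = s ++ [m] := by
          simp [PySem.Set.add, hs]
        have e1 : s.filter (fun m => decide (m ∈ pvPrimaryMethods))
            = (s ++ [m]).filter (fun m => decide (m ∈ pvPrimaryMethods)) := by
          simp [List.filter_append, hp]
        have e2 : s.filter (fun m => !decide (m ∈ pvPrimaryMethods)) ++ [m]
            = (s ++ [m]).filter (fun m => !decide (m ∈ pvPrimaryMethods)) := by
          simp [List.filter_append, hp]
        simp only [pvLoopA, if_neg hp, if_neg h1, e1, e2, List.foldl_cons, hadd, ih (s ++ [m])]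

-- ===== VERDICT (by name: the statement is the Claim_ definition above) =====
theorem methods_for_json_py_spec : Claim_equal_methods_for_json_py := by
  intro methods _
  unfold Spec_methods_for_json_py methods_for_json_py methods_for_json_py_alt
  have h := pvLoopA_eq_filter_fold methods []
  simp only [List.filter_nil] at h
  simp [h, PySem.List.dedup_eq_ofList, PySem.Set.ofList]
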